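-- pv_equiv track=rewrite | github.com/jinseo-James-Cha/python_algorithm | 1144-optimize-water-distribution-in-a-village/1144-optimize-water-distribution-in-a-village.py | minCostToSupplyWater
-- ===== SOURCE A (Python) =====
-- from typing import List
--
-- class UnionFind:
--     def __init__(self, size):
--         self.parent = list(range(size+1))
--         self.rank = [0] * (size+1)
--
--     def find(self, x):
--         if self.parent[x] != x:
--             self.parent[x] = self.find(self.parent[x])
--         return self.parent[x]
--
--     def union(self, x, y):
--         xset, yset = self.find(x), self.find(y)
--         if xset == yset:
--             return False
--
--         if self.rank[xset] > self.rank[yset]: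
--             self.parent[yset] = xset
--         elif self.rank[xset] < self.rank[yset]:
--             self.parent[xset] = yset
--         else:
--             self.parent[xset] = yset
--             self.rank[yset] += 1
--         return True
--
--     def isConnected(self, x, y):
--         return self.find(x) == self.find(y)
--
-- def minCostToSupplyWater(n: int, wells: List[int], pipes: List[List[int]]) -> int:
--     ordered_edges = []
--     for index, weight in enumerate(wells):
--         ordered_edges.append((weight, 0, index + 1))
--
--     for h1, h2, weight in pipes:
--         ordered_edges.append((weight, h1, h2))
--
--     ordered_edges.sort(key=lambda x: x[0])
--
--     uf = UnionFind(n)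
--     total_cost = 0
--     for cost, h1, h2 in ordered_edges:
--         if uf.union(h1, h2):
--             total_cost += cost
--
--     return total_cost
-- ===== SOURCE B (Python) =====
-- from typing import List
--
-- def minCostToSupplyWater(n: int, wells: List[int], pipes: List[List[int]]) -> int:
--     # Kruskal without union-find: flat component labels, merged by relabelling.
--     edges = [(w, 0, i + 1) for i, w in enumerate(wells)]
--     edges += [(w, h1, h2) for h1, h2, w in pipes]
--     edges.sort(key=lambda e: e[0])
--
--     comp = list(range(n + 1))
--     total = 0
--     for w, a, b in edges:
--         ca, cb = comp[a], comp[b]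
--         if ca != cb:
--             comp = [cb if c == ca else c for c in comp]
--             total += w
--     return total
-- ===== Notes on version B (the rewrite author's own statement) =====
-- stated objective: alternative
-- what changed: Kruskal's rank/path-compression union-find (recursive find, two parallel arrays mutated in place) is replaced by a flat component-label array merged by whole-array relabelling; the sorted-edge scan is the only shared part.
import Mathlib
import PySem

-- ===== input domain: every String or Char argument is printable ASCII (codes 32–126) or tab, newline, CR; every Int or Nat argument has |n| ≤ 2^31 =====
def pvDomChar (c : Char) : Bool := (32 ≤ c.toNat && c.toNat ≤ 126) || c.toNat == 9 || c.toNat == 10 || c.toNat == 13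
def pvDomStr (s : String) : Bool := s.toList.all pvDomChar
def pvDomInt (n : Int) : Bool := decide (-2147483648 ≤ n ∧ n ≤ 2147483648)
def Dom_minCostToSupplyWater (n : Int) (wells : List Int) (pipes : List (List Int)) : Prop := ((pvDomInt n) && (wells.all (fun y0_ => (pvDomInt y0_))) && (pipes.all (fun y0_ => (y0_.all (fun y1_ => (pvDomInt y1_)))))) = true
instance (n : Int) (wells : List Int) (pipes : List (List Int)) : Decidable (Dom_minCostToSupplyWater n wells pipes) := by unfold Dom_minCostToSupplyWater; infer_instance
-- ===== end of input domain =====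

-- B replaces A's rank/path-compression union-find by a flat component-label array merged by
-- whole-array relabelling (alternative algorithm, similar cost); equivalence of the return value.

-- ===== PORT A =====
-- tuple unpacking 'h1, h2, w = row' for a 3-element row (Pre_ guarantees the length)
def pvRow (row : List Int) : Int × Int × Int :=
  match row with
  | [a, b, c] => (a, b, c)
  | _ => (0, 0, 0)

-- UnionFind.find with path compression; fuel is a totality guard only (parent.length is
-- always enough on inputs satisfying Pre_, proved below)
def pvFindA (parent : List Int) (x : Int) : Nat → List Int × Int
  | 0 => (parent, x)
  | fuel+1 =>
    let px := PySem.List.pyGetD parent x 0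
    if px ≠ x then
      let res := pvFindA parent px fuel
      (PySem.List.pySetD res.1 x res.2, res.2)
    else (parent, x)

-- UnionFind.union (union by rank); returns (parent, rank, flag)
def pvUnionA (parent rank : List Int) (x y : Int) (fuel : Nat) : List Int × List Int × Bool :=
  let f1 := pvFindA parent x fuel
  let f2 := pvFindA f1.1 y fuel
  let p := f2.1
  let xset := f1.2
  let yset := f2.2
  if xset = yset then (p, rank, false)
  else if PySem.List.pyGetD rank yset 0 < PySem.List.pyGetD rank xset 0 then
    (PySem.List.pySetD p yset xset, rank, true)
  else if PySem.List.pyGetD rank xset 0 < PySem.List.pyGetD rank yset 0 then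
    (PySem.List.pySetD p xset yset, rank, true)
  else
    (PySem.List.pySetD p xset yset,
     PySem.List.pySetD rank yset (PySem.List.pyGetD rank yset 0 + 1), true)

def minCostToSupplyWater (n : Int) (wells : List Int) (pipes : List (List Int)) : Int :=
  let edges0 := (PySem.List.enumerate wells 0).foldl
    (fun acc iw => acc ++ [(iw.2, (0 : Int), iw.1 + 1)]) []
  let edges1 := pipes.foldl
    (fun acc row => acc ++ [((pvRow row).2.2, (pvRow row).1, (pvRow row).2.1)]) edges0
  let ordered := PySem.List.sorted edges1 (fun e => e.1) false
  let st := ordered.foldl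
    (fun (s : List Int × List Int × Int) e =>
      let u := pvUnionA s.1 s.2.1 e.2.1 e.2.2 s.1.length
      if u.2.2 then (u.1, u.2.1, s.2.2 + e.1) else (u.1, u.2.1, s.2.2))
    (PySem.List.pyRange 0 (n + 1) 1, PySem.List.pyRepeat [(0 : Int)] (n + 1), 0)
  st.2.2

-- ===== PORT B =====
def minCostToSupplyWater_alt (n : Int) (wells : List Int) (pipes : List (List Int)) : Int :=
  let edges := PySem.List.sorted
    ((PySem.List.enumerate wells 0).map (fun iw => (iw.2, (0 : Int), iw.1 + 1))
      ++ pipes.map (fun row => ((pvRow row).2.2, (pvRow row).1, (pvRow row).2.1)))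
    (fun e => e.1) false
  let st := edges.foldl
    (fun (s : List Int × Int) e =>
      let ca := PySem.List.pyGetD s.1 e.2.1 0
      let cb := PySem.List.pyGetD s.1 e.2.2 0
      if ca ≠ cb then (s.1.map (fun c => if c = ca then cb else c), s.2 + e.1) else s)
    (PySem.List.pyRange 0 (n + 1) 1, 0)
  st.2

-- ===== PRECONDITION & SPEC =====
-- Pre_ holds exactly where A returns normally: it excludes only the inputs on which A raises
-- an IndexError/ValueError (more wells than n houses, pipe rows that are not [h1, h2, w]
-- triples, endpoints outside the list index range -(n+1)..n, negative n with any well or pipe;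
-- negative in-range endpoints wrap Python-style and are admitted, as is negative n with no
-- wells and no pipes, where A touches no list).
def Pre_minCostToSupplyWater (n : Int) (wells : List Int) (pipes : List (List Int)) : Prop :=
  (0 ≤ n ∧ (wells.length : Int) ≤ n ∧
    ∀ row ∈ pipes, row.length = 3 ∧ -(n + 1) ≤ row.getD 0 0 ∧ row.getD 0 0 ≤ n ∧
      -(n + 1) ≤ row.getD 1 0 ∧ row.getD 1 0 ≤ n) ∨
  (wells = [] ∧ pipes = [])
instance (n : Int) (wells : List Int) (pipes : List (List Int)) : Decidable (Pre_minCostToSupplyWater n wells pipes) := by unfold Pre_minCostToSupplyWater; infer_instance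

def pvWitness_minCostToSupplyWater : Int × List Int × List (List Int) :=
  (2, [1, 1], [[1, 2, 1]])

def Spec_minCostToSupplyWater (n : Int) (wells : List Int) (pipes : List (List Int)) (out : Int) : Prop := out = minCostToSupplyWater_alt n wells pipes
instance (n : Int) (wells : List Int) (pipes : List (List Int)) (out : Int) : Decidable (Spec_minCostToSupplyWater n wells pipes out) := by unfold Spec_minCostToSupplyWater; infer_instance

-- ===== CLAIM (what is proved, stated in full; the proofs are below) =====
def Claim_equal_minCostToSupplyWater : Prop := ∀ (n : Int) (wells : List Int) (pipes : List (List Int)), Dom_minCostToSupplyWater n wells pipes → Pre_minCostToSupplyWater n wells pipes → Spec_minCostToSupplyWater n wells pipes (minCostToSupplyWater n wells pipes)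

-- ===== LEMMAS AND PROOFS =====

-- parent/rank are well-formed: entries in range, rank strictly increasing along parent edges
def WFp (L : Nat) (p r : List Int) : Prop :=
  p.length = L ∧ r.length = L ∧
  (∀ i, i < L → 0 ≤ p.getD i 0 ∧ (p.getD i 0).toNat < L) ∧
  (∀ i, i < L → p.getD i 0 ≠ (i : Int) → r.getD i 0 < r.getD (p.getD i 0).toNat 0)

-- B's labels are constant along A's parent edges
def CCp (L : Nat) (comp p : List Int) : Prop :=
  ∀ i, i < L → comp.getD i 0 = comp.getD (p.getD i 0).toNat 0

-- B's labels are injective on A's roots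
def InjP (L : Nat) (comp p : List Int) : Prop :=
  ∀ i j, i < L → j < L → p.getD i 0 = (i : Int) → p.getD j 0 = (j : Int) →
    comp.getD i 0 = comp.getD j 0 → i = j

def InvQ (L : Nat) (comp p r : List Int) : Prop :=
  comp.length = L ∧ WFp L p r ∧ CCp L comp p ∧ InjP L comp p

-- termination measure for find: how many nodes have rank ≥ rank of x
def pvMes (L : Nat) (r : List Int) (x : Nat) : Nat :=
  ((Finset.range L).filter (fun i => r.getD x 0 ≤ r.getD i 0)).card

lemma pvMes_pos {L : Nat} (r : List Int) {x : Nat} (hx : x < L) : 0 < pvMes L r x := by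
  apply Finset.card_pos.mpr
  exact ⟨x, by simp [Finset.mem_filter, hx]⟩

lemma pvMes_le (L : Nat) (r : List Int) (x : Nat) : pvMes L r x ≤ L := by
  calc pvMes L r x ≤ (Finset.range L).card := Finset.card_filter_le _ _
  _ = L := Finset.card_range L

lemma pvMes_lt {L : Nat} {r : List Int} {x y : Nat} (hx : x < L)
    (h : r.getD x 0 < r.getD y 0) : pvMes L r y < pvMes L r x := by
  apply Finset.card_lt_card
  constructor
  · intro i hi
    simp only [Finset.mem_filter, Finset.mem_range] at *
    exact ⟨hi.1, le_trans h.le hi.2⟩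
  · intro hsub
    have := hsub (by simp [Finset.mem_filter, hx] :
      x ∈ (Finset.range L).filter (fun i => r.getD x 0 ≤ r.getD i 0))
    simp only [Finset.mem_filter] at this
    omega

lemma getD_set_int (l : List Int) (i j : Nat) (v : Int) (hi : i < l.length) :
    (l.set i v).getD j 0 = if j = i then v else l.getD j 0 := by
  by_cases h : j = i
  · subst h; simp [List.getD, hi]
  · rw [if_neg h]
    simp only [List.getD, List.getElem?_set]
    rw [if_neg (show ¬ i = j from fun hh => h hh.symm)]

lemma getD_map_int (f : Int → Int) (l : List Int) (j : Nat) (hj : j < l.length) :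
    (l.map f).getD j 0 = f (l.getD j 0) := by
  simp [List.getD, hj]

lemma find_spec (L : Nat) (comp r : List Int) :
    ∀ (fuel : Nat) (p : List Int) (x : Int),
    WFp L p r → CCp L comp p →
    0 ≤ x → x.toNat < L → pvMes L r x.toNat ≤ fuel →
    0 ≤ (pvFindA p x fuel).2 ∧ (pvFindA p x fuel).2.toNat < L ∧
    p.getD (pvFindA p x fuel).2.toNat 0 = (pvFindA p x fuel).2 ∧
    (∀ z, z < L → (p.getD z 0 = (z : Int) ↔ (pvFindA p x fuel).1.getD z 0 = (z : Int))) ∧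
    WFp L (pvFindA p x fuel).1 r ∧ CCp L comp (pvFindA p x fuel).1 ∧
    comp.getD x.toNat 0 = comp.getD (pvFindA p x fuel).2.toNat 0 ∧
    (x ≠ (pvFindA p x fuel).2 → r.getD x.toNat 0 < r.getD (pvFindA p x fuel).2.toNat 0) := by
  intro fuel
  induction fuel with
  | zero =>
    intro p x hWF hCC hx0 hxL hm
    exact absurd hm (by have := pvMes_pos r hxL; omega)
  | succ fuel ih =>
    intro p x hWF hCC hx0 hxL hm
    have hxcast : x = ((x.toNat : Nat) : Int) := (Int.toNat_of_nonneg hx0).symm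
    have hget : PySem.List.pyGetD p x 0 = p.getD x.toNat 0 := by
      rw [hxcast]; exact PySem.List.pyGetD_natCast ..
    by_cases hne : p.getD x.toNat 0 = x
    · have hres : pvFindA p x (fuel+1) = (p, x) := by
        simp only [pvFindA, hget]
        rw [if_neg (not_not_intro hne)]
      rw [hres]
      exact ⟨hx0, hxL, hne, fun z _ => Iff.rfl, hWF, hCC, rfl, fun h => absurd rfl h⟩
    · obtain ⟨hpl, hrl, hrange, hrank⟩ := hWF
      set px := p.getD x.toNat 0 with hpxdef
      have h0px : 0 ≤ px ∧ px.toNat < L := hrange x.toNat hxL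
      have hrx : r.getD x.toNat 0 < r.getD px.toNat 0 :=
        hrank x.toNat hxL (by rw [← hxcast]; exact hne)
      have hmlt : pvMes L r px.toNat ≤ fuel := by
        have := pvMes_lt hxL hrx; omega
      obtain ⟨hrt0, hrtL, hrtroot, hroots, hWFq, hCCq, hcompx, hrankx⟩ :=
        ih p px ⟨hpl, hrl, hrange, hrank⟩ hCC h0px.1 h0px.2 hmlt
      have hres : pvFindA p x (fuel+1) =
          (PySem.List.pySetD (pvFindA p px fuel).1 x (pvFindA p px fuel).2,
           (pvFindA p px fuel).2) := by
        simp only [pvFindA, hget]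
        rw [if_pos hne]
      rw [hres]
      set q := (pvFindA p px fuel).1 with hqdef
      set rt := (pvFindA p px fuel).2 with hrtdef
      obtain ⟨hql, hqrl, hqrange, hqrank⟩ := hWFq
      have hrtcast : rt = ((rt.toNat : Nat) : Int) := (Int.toNat_of_nonneg hrt0).symm
      have hset : PySem.List.pySetD q x rt = q.set x.toNat rt := by
        rw [hxcast]; exact PySem.List.pySetD_natCast ..
      have hxqL : x.toNat < q.length := by omega
      have hrxrt : r.getD x.toNat 0 < r.getD rt.toNat 0 := by
        by_cases h : px = rt
        · rw [h] at hrx; exact hrx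
        · exact lt_trans hrx (hrankx h)
      have hxrtN : x.toNat ≠ rt.toNat := fun h => by rw [h] at hrxrt; omega
      have hrt_ne_x : rt ≠ ((x.toNat : Nat) : Int) := by
        rw [hrtcast]; intro h; exact hxrtN (by omega)
      have hgd : ∀ z : Nat, (q.set x.toNat rt).getD z 0 =
          if z = x.toNat then rt else q.getD z 0 := fun z => getD_set_int q x.toNat z rt hxqL
      rw [hset]
      have hCCx : comp.getD x.toNat 0 = comp.getD rt.toNat 0 := by
        rw [hCC x.toNat hxL, ← hpxdef, hcompx]
      refine ⟨hrt0, hrtL, ?_, ?_, ⟨by simp [hql], hqrl, ?_, ?_⟩, ?_, hCCx, fun _ => hrxrt⟩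
      · exact hrtroot
      · intro z hzL
        rw [hroots z hzL, hgd z]
        by_cases hz : z = x.toNat
        · subst hz
          rw [if_pos rfl]
          constructor
          · intro h
            exact absurd ((hroots x.toNat hxL).mpr h) (by rw [← hxcast]; exact hne)
          · intro h; exact absurd h hrt_ne_x
        · rw [if_neg hz]
      · intro i hiL
        rw [hgd i]
        by_cases hz : i = x.toNat
        · subst hz; rw [if_pos rfl]; exact ⟨hrt0, hrtL⟩
        · rw [if_neg hz]; exact hqrange i hiL
      · intro i hiL hne'
        rw [hgd i] at hne' ⊢
        by_cases hz : i = x.toNat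
        · subst hz; rw [if_pos rfl]; rw [hrtcast]; rw [Int.toNat_natCast]; exact hrxrt
        · rw [if_neg hz] at hne' ⊢; exact hqrank i hiL hne'
      · intro i hiL
        rw [hgd i]
        by_cases hz : i = x.toNat
        · subst hz; rw [if_pos rfl, hrtcast, Int.toNat_natCast]; exact hCCx
        · rw [if_neg hz]; exact hCCq i hiL

lemma union_spec (L : Nat) (comp p r : List Int) (a b : Int)
    (hInv : InvQ L comp p r)
    (ha0 : 0 ≤ a) (haL : a.toNat < L) (hb0 : 0 ≤ b) (hbL : b.toNat < L) :
    (((pvUnionA p r a b p.length).2.2 = false →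
        comp.getD a.toNat 0 = comp.getD b.toNat 0 ∧
        InvQ L comp (pvUnionA p r a b p.length).1 (pvUnionA p r a b p.length).2.1) ∧
     ((pvUnionA p r a b p.length).2.2 = true →
        comp.getD a.toNat 0 ≠ comp.getD b.toNat 0 ∧
        InvQ L (comp.map (fun c => if c = comp.getD a.toNat 0 then comp.getD b.toNat 0 else c))
          (pvUnionA p r a b p.length).1 (pvUnionA p r a b p.length).2.1)) := by
  obtain ⟨hcl, hWF, hCC, hInj⟩ := hInv
  have hplen : p.length = L := hWF.1
  have hmes_a : pvMes L r a.toNat ≤ p.length := by rw [hplen]; exact pvMes_le L r a.toNat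
  obtain ⟨hx0, hxL, hxroot, hroots1, hWF1, hCC1, hca, hranka⟩ :=
    find_spec L comp r p.length p a hWF hCC ha0 haL hmes_a
  have hmes_b : pvMes L r b.toNat ≤ p.length := by rw [hplen]; exact pvMes_le L r b.toNat
  obtain ⟨hy0, hyL, hyroot, hroots2, hWF2, hCC2, hcb, hrankb⟩ :=
    find_spec L comp r p.length (pvFindA p a p.length).1 b hWF1 hCC1 hb0 hbL hmes_b
  set rtx := (pvFindA p a p.length).2 with hrtxdef
  set p1 := (pvFindA p a p.length).1 with hp1def
  set rty := (pvFindA p1 b p.length).2 with hrtydef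
  set p2 := (pvFindA p1 b p.length).1 with hp2def
  obtain ⟨hp2l, hrl, hrange2, hrank2⟩ := hWF2
  have hxcast : rtx = ((rtx.toNat : Nat) : Int) := (Int.toNat_of_nonneg hx0).symm
  have hycast : rty = ((rty.toNat : Nat) : Int) := (Int.toNat_of_nonneg hy0).symm
  have hroots12 : ∀ z, z < L → (p.getD z 0 = (z : Int) ↔ p2.getD z 0 = (z : Int)) :=
    fun z hz => (hroots1 z hz).trans (hroots2 z hz)
  have hInj2 : InjP L comp p2 := fun i j hi hj ri rj hc =>
    hInj i j hi hj ((hroots12 i hi).mpr ri) ((hroots12 j hj).mpr rj) hc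
  have hxroot2 : p2.getD rtx.toNat 0 = ((rtx.toNat : Nat) : Int) :=
    (hroots12 rtx.toNat hxL).mp (by rw [← hxcast]; exact hxroot)
  have hyroot2 : p2.getD rty.toNat 0 = ((rty.toNat : Nat) : Int) :=
    (hroots2 rty.toNat hyL).mp (by rw [← hycast]; exact hyroot)
  set ca := comp.getD a.toNat 0 with hcadef
  set cb := comp.getD b.toNat 0 with hcbdef
  by_cases heq : rtx = rty
  · have hu : pvUnionA p r a b p.length = (p2, r, false) := by
      simp only [pvUnionA]
      rw [← hrtxdef, ← hp1def, ← hrtydef, ← hp2def, if_pos heq]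
    rw [hu]
    refine ⟨fun _ => ⟨?_, hcl, ⟨hp2l, hrl, hrange2, hrank2⟩, hCC2, hInj2⟩,
      fun hfl => by simp at hfl⟩
    show ca = cb
    rw [hca, hcb, heq]
  · -- the two roots differ; in all three rank branches the flag is true
    have hxyN : rtx.toNat ≠ rty.toNat := fun h => heq (by rw [hxcast, hycast, h])
    have hcacb : ca ≠ cb := by
      intro h
      apply hxyN
      apply hInj2 rtx.toNat rty.toNat hxL hyL hxroot2 hyroot2
      rw [← hca, ← hcb]; exact h
    -- label map facts
    have hcomp_map : ∀ z, z < L →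
        (comp.map (fun c => if c = ca then cb else c)).getD z 0 =
        (fun c => if c = ca then cb else c) (comp.getD z 0) := by
      intro z hz
      exact getD_map_int _ comp z (by omega)
    have hmaplen : (comp.map (fun c => if c = ca then cb else c)).length = L := by
      rw [List.length_map]; exact hcl
    have hcrtx : comp.getD rtx.toNat 0 = ca := hca.symm
    have hcrty : comp.getD rty.toNat 0 = cb := hcb.symm
    -- generic facts for a merge step p3 = p2.set loser winner
    have main : ∀ (los win : Nat) (v : Int) (r3 : List Int), v = ((win : Nat) : Int) → los < L → win < L →
        (los = rtx.toNat ∧ win = rty.toNat ∨ los = rty.toNat ∧ win = rtx.toNat) →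
        r3.length = L →
        (r3.getD los 0 < r3.getD win 0) →
        (∀ i, i < L → i ≠ los → p2.getD i 0 ≠ (i : Int) →
          r3.getD i 0 < r3.getD (p2.getD i 0).toNat 0) →
        InvQ L (comp.map (fun c => if c = ca then cb else c)) (p2.set los v) r3 := by
      intro los win v r3 hv hlosL hwinL hcases hr3l hr3lt hr3old
      subst hv
      have hgd : ∀ z : Nat, (p2.set los ((win : Nat) : Int)).getD z 0 =
          if z = los then ((win : Nat) : Int) else p2.getD z 0 :=
        fun z => getD_set_int p2 los z _ (by omega)
      have hlw : los ≠ win := by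
        rcases hcases with ⟨h1, h2⟩ | ⟨h1, h2⟩ <;> subst h1 <;> subst h2 <;> omega
      have hcompmerge : (fun c => if c = ca then cb else c) (comp.getD los 0) =
          (fun c => if c = ca then cb else c) (comp.getD win 0) := by
        rcases hcases with ⟨h1, h2⟩ | ⟨h1, h2⟩ <;> subst h1 <;> subst h2 <;>
          simp only [hcrtx, hcrty] <;>
          rw [if_neg (Ne.symm hcacb)] <;> simp
      refine ⟨hmaplen, ⟨by rw [List.length_set]; exact hp2l, hr3l, ?_, ?_⟩, ?_, ?_⟩
      · -- range
        intro i hi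
        rw [hgd i]
        by_cases hz : i = los
        · rw [if_pos hz]; exact ⟨by omega, by omega⟩
        · rw [if_neg hz]; exact hrange2 i hi
      · -- rank
        intro i hi hne'
        rw [hgd i] at hne' ⊢
        by_cases hz : i = los
        · subst hz; rw [if_pos rfl]; rw [Int.toNat_natCast]; exact hr3lt
        · rw [if_neg hz] at hne' ⊢; exact hr3old i hi hz hne'
      · -- CC
        intro i hi
        rw [hgd i, hcomp_map i hi]
        by_cases hz : i = los
        · subst hz
          rw [if_pos rfl, Int.toNat_natCast, hcomp_map win hwinL]
          exact hcompmerge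
        · rw [if_neg hz, hcomp_map (p2.getD i 0).toNat (hrange2 i hi).2]
          rw [hCC2 i hi]
      · -- Inj
        intro i j hi hj ri rj hc
        rw [hgd i] at ri
        rw [hgd j] at rj
        by_cases hzi : i = los
        · rw [if_pos hzi] at ri
          exact absurd ri (by rw [hzi]; intro h; exact hlw (by exact_mod_cast h.symm))
        · by_cases hzj : j = los
          · rw [if_pos hzj] at rj
            exact absurd rj (by rw [hzj]; intro h; exact hlw (by exact_mod_cast h.symm))
          · rw [if_neg hzi] at ri
            rw [if_neg hzj] at rj
            rw [hcomp_map i hi, hcomp_map j hj] at hc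
            simp only at hc
            by_cases hci : comp.getD i 0 = ca <;> by_cases hcj : comp.getD j 0 = ca
            · exact hInj2 i j hi hj ri rj (by rw [hci, hcj])
            · rw [if_pos hci, if_neg hcj] at hc
              -- comp i = ca, comp j = cb : i = rtx.toNat, j = rty.toNat
              have hi' : i = rtx.toNat := hInj2 i rtx.toNat hi hxL ri hxroot2 (by rw [hci, hcrtx])
              have hj' : j = rty.toNat := hInj2 j rty.toNat hj hyL rj hyroot2 (by rw [← hc, hcrty])
              rcases hcases with ⟨h1, _⟩ | ⟨h1, _⟩
              · exact absurd (hi'.trans h1.symm) hzi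
              · exact absurd (hj'.trans h1.symm) hzj
            · rw [if_neg hci, if_pos hcj] at hc
              have hj' : j = rtx.toNat := hInj2 j rtx.toNat hj hxL rj hxroot2 (by rw [hcj, hcrtx])
              have hi' : i = rty.toNat := hInj2 i rty.toNat hi hyL ri hyroot2 (by rw [hc, hcrty])
              rcases hcases with ⟨h1, _⟩ | ⟨h1, _⟩
              · exact absurd (hj'.trans h1.symm) hzj
              · exact absurd (hi'.trans h1.symm) hzi
            · rw [if_neg hci, if_neg hcj] at hc
              exact hInj2 i j hi hj ri rj hc
    -- rank reads
    have hgrx : PySem.List.pyGetD r rtx 0 = r.getD rtx.toNat 0 := by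
      rw [hxcast]; exact PySem.List.pyGetD_natCast ..
    have hgry : PySem.List.pyGetD r rty 0 = r.getD rty.toNat 0 := by
      rw [hycast]; exact PySem.List.pyGetD_natCast ..
    have hsetx : ∀ v : Int, PySem.List.pySetD p2 rtx v = p2.set rtx.toNat v := by
      intro v; rw [hxcast]; exact PySem.List.pySetD_natCast ..
    have hsety : ∀ v : Int, PySem.List.pySetD p2 rty v = p2.set rty.toNat v := by
      intro v; rw [hycast]; exact PySem.List.pySetD_natCast ..
    by_cases hr1 : r.getD rty.toNat 0 < r.getD rtx.toNat 0
    · have hu : pvUnionA p r a b p.length = (p2.set rty.toNat rtx, r, true) := by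
        simp only [pvUnionA]
        rw [← hrtxdef, ← hp1def, ← hrtydef, ← hp2def, if_neg heq, hgrx, hgry,
          if_pos hr1, hsety rtx]
      rw [hu]
      refine ⟨fun hfl => by simp at hfl, fun _ => ⟨hcacb, ?_⟩⟩
      exact main rty.toNat rtx.toNat rtx r hxcast hyL hxL (Or.inr ⟨rfl, rfl⟩) hrl hr1
        (fun i hi _ hne' => hrank2 i hi hne')
    · by_cases hr2 : r.getD rtx.toNat 0 < r.getD rty.toNat 0
      · have hu : pvUnionA p r a b p.length = (p2.set rtx.toNat rty, r, true) := by
          simp only [pvUnionA]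
          rw [← hrtxdef, ← hp1def, ← hrtydef, ← hp2def, if_neg heq, hgrx, hgry,
            if_neg hr1, if_pos hr2, hsetx rty]
        rw [hu]
        refine ⟨fun hfl => by simp at hfl, fun _ => ⟨hcacb, ?_⟩⟩
        exact main rtx.toNat rty.toNat rty r hycast hxL hyL (Or.inl ⟨rfl, rfl⟩) hrl hr2
          (fun i hi _ hne' => hrank2 i hi hne')
      · -- equal ranks: parent[xset] = yset, rank[yset] += 1
        have hreq : r.getD rtx.toNat 0 = r.getD rty.toNat 0 := by omega
        have hu : pvUnionA p r a b p.length =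
            (p2.set rtx.toNat rty, r.set rty.toNat (r.getD rty.toNat 0 + 1), true) := by
          simp only [pvUnionA]
          rw [← hrtxdef, ← hp1def, ← hrtydef, ← hp2def, if_neg heq, hgrx, hgry,
            if_neg hr1, if_neg hr2, hsetx rty]
          rw [show PySem.List.pySetD r rty (r.getD rty.toNat 0 + 1) =
            r.set rty.toNat (r.getD rty.toNat 0 + 1) from by
              rw [hycast]; exact PySem.List.pySetD_natCast ..]
        rw [hu]
        refine ⟨fun hfl => by simp at hfl, fun _ => ⟨hcacb, ?_⟩⟩
        have hgr : ∀ z : Nat, (r.set rty.toNat (r.getD rty.toNat 0 + 1)).getD z 0 =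
            if z = rty.toNat then r.getD rty.toNat 0 + 1 else r.getD z 0 :=
          fun z => getD_set_int r rty.toNat z _ (by omega)
        apply main rtx.toNat rty.toNat rty _ hycast hxL hyL (Or.inl ⟨rfl, rfl⟩)
          (by rw [List.length_set]; exact hrl)
        · rw [hgr rtx.toNat, hgr rty.toNat, if_neg hxyN, if_pos rfl, hreq]; omega
        · intro i hi hne1 hne2
          rw [hgr i]
          have htgt := hgr (p2.getD i 0).toNat
          by_cases hz : i = rty.toNat
          · subst hz
            exact absurd hyroot2 hne2
          · rw [if_neg hz, htgt]
            have hold := hrank2 i hi hne2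
            by_cases hz2 : (p2.getD i 0).toNat = rty.toNat
            · rw [if_pos hz2]; rw [hz2] at hold; omega
            · rw [if_neg hz2]; exact hold

-- Python negative indices wrap: normalised index
def pvNrm (L : Nat) (i : Int) : Nat := (if i < 0 then (L : Int) + i else i).toNat

lemma pvNrm_lt {L : Nat} {i : Int} (h1 : -(L : Int) ≤ i) (h2 : i < (L : Int)) : pvNrm L i < L := by
  unfold pvNrm; split <;> omega

lemma pyGetD_wrap (xs : List Int) (i d : Int) (h1 : -(xs.length : Int) ≤ i) (h2 : i < 0) :
    PySem.List.pyGetD xs i d = xs.getD ((xs.length : Int) + i).toNat d := by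
  rw [show i = -(((-i).toNat : Nat) : Int) from by omega]
  rw [PySem.List.pyGetD_neg_natCast _ _ _ (by omega) (by omega)]
  rw [List.getD_eq_getElem _ _ (by omega)]
  congr 1
  omega

lemma pySetD_wrap (xs : List Int) (i v : Int) (h1 : -(xs.length : Int) ≤ i) (h2 : i < 0) :
    PySem.List.pySetD xs i v = xs.set ((xs.length : Int) + i).toNat v := by
  rw [show i = -(((-i).toNat : Nat) : Int) from by omega]
  unfold PySem.List.pySetD PySem.List.pySet? PySem.List.pyIdx?
  rw [if_neg (by omega), if_pos (by omega)]
  simp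
  congr 1
  omega

lemma pyGetD_nrm (L : Nat) (xs : List Int) (i d : Int) (hxs : xs.length = L)
    (h1 : -(L : Int) ≤ i) (_h2 : i < (L : Int)) :
    PySem.List.pyGetD xs i d = xs.getD (pvNrm L i) d := by
  unfold pvNrm
  by_cases hneg : i < 0
  · rw [if_pos hneg, pyGetD_wrap xs i d (by omega) hneg, hxs]
  · rw [if_neg hneg, show i = ((i.toNat : Nat) : Int) from by omega]
    rw [PySem.List.pyGetD_natCast, Int.toNat_natCast]

lemma CCp_replicate (L : Nat) (p : List Int) : CCp L (List.replicate L (0 : Int)) p := by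
  have hz : ∀ j : Nat, (List.replicate L (0 : Int)).getD j 0 = 0 := by
    intro j
    simp [List.getD, List.getElem?_replicate]
    split <;> rfl
  intro i hi
  rw [hz, hz]

lemma find_root_fix (M : Nat) (p : List Int) (y : Int) (hy : 0 ≤ y)
    (hroot : p.getD y.toNat 0 = y) : pvFindA p y M = (p, y) := by
  cases M with
  | zero => rfl
  | succ M =>
    have hg : PySem.List.pyGetD p y 0 = p.getD y.toNat 0 := by
      rw [show y = ((y.toNat : Nat) : Int) from by omega]
      rw [PySem.List.pyGetD_natCast, Int.toNat_natCast]
    simp only [pvFindA]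
    rw [hg, if_neg (not_not_intro hroot)]

lemma find_norm (L : Nat) (p r : List Int) (x : Int) (hWF : WFp L p r)
    (h1 : -(L : Int) ≤ x) (h2 : x < 0) :
    pvFindA p x L = pvFindA p ((pvNrm L x : Nat) : Int) L := by
  have hL1 : 1 ≤ L := by omega
  obtain ⟨M, rfl⟩ : ∃ M, L = M + 1 := ⟨L - 1, by omega⟩
  obtain ⟨hpl, hrl, hrange, hrank⟩ := hWF
  have hnxval : pvNrm (M + 1) x = ((((M + 1 : Nat) : Int)) + x).toNat := by
    unfold pvNrm; rw [if_pos h2]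
  set nx := pvNrm (M + 1) x with hnxdef
  have hnxL : nx < M + 1 := pvNrm_lt h1 (by omega)
  have hgx : PySem.List.pyGetD p x 0 = p.getD nx 0 :=
    pyGetD_nrm (M + 1) p x 0 hpl h1 (by omega)
  have hgnx : PySem.List.pyGetD p ((nx : Nat) : Int) 0 = p.getD nx 0 := by simp
  have hpx := hrange nx hnxL
  have hpxnex : p.getD nx 0 ≠ x := by omega
  simp only [pvFindA]
  rw [hgx, hgnx, if_pos hpxnex]
  by_cases hroot : p.getD nx 0 = ((nx : Nat) : Int)
  · rw [if_neg (not_not_intro hroot), hroot]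
    rw [find_root_fix M p ((nx : Nat) : Int) (by omega) (by rw [Int.toNat_natCast]; exact hroot)]
    rw [pySetD_wrap p x _ (by omega) h2]
    rw [show ((p.length : Int) + x).toNat = nx from by omega]
    have hroot' : p[nx]'(by omega) = ((nx : Nat) : Int) := by
      rw [← List.getD_eq_getElem _ _ (by omega)]; exact hroot
    rw [← hroot', List.set_getElem_self]
  · rw [if_pos hroot]
    have hrx : r.getD nx 0 < r.getD (p.getD nx 0).toNat 0 := hrank nx hnxL hroot
    have hmes : pvMes (M + 1) r (p.getD nx 0).toNat ≤ M := by
      have := pvMes_lt hnxL hrx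
      have := pvMes_le (M + 1) r nx
      omega
    obtain ⟨_, _, _, _, hWFq, _, _, _⟩ :=
      find_spec (M + 1) (List.replicate (M + 1) 0) r M p (p.getD nx 0)
        ⟨hpl, hrl, hrange, hrank⟩ (CCp_replicate (M + 1) p) hpx.1 hpx.2 hmes
    have hql : (pvFindA p (p.getD nx 0) M).1.length = M + 1 := hWFq.1
    rw [pySetD_wrap _ x _ (by omega) h2]
    rw [show (((pvFindA p (p.getD nx 0) M).1.length : Int) + x).toNat = nx from by omega]
    rw [show PySem.List.pySetD (pvFindA p (p.getD nx 0) M).1 ((nx : Nat) : Int)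
        (pvFindA p (p.getD nx 0) M).2
        = (pvFindA p (p.getD nx 0) M).1.set nx (pvFindA p (p.getD nx 0) M).2 from by
      rw [PySem.List.pySetD_natCast]]

lemma union_norm (L : Nat) (comp p r : List Int) (a b : Int) (hInv : InvQ L comp p r)
    (ha1 : -(L : Int) ≤ a) (ha2 : a < (L : Int)) (hb1 : -(L : Int) ≤ b) (_hb2 : b < (L : Int)) :
    pvUnionA p r a b p.length
      = pvUnionA p r ((pvNrm L a : Nat) : Int) ((pvNrm L b : Nat) : Int) p.length := by
  obtain ⟨hcl, hWF, hCC, hInj⟩ := hInv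
  have hplen : p.length = L := hWF.1
  have hfind1 : pvFindA p a p.length = pvFindA p ((pvNrm L a : Nat) : Int) p.length := by
    by_cases hneg : a < 0
    · rw [hplen]; exact find_norm L p r a hWF ha1 hneg
    · rw [show ((pvNrm L a : Nat) : Int) = a from by unfold pvNrm; rw [if_neg hneg]; omega]
  have hmes : pvMes L r ((pvNrm L a : Nat) : Int).toNat ≤ p.length := by
    rw [hplen]; exact pvMes_le ..
  obtain ⟨_, _, _, _, hWF1, _, _, _⟩ :=
    find_spec L comp r p.length p ((pvNrm L a : Nat) : Int) hWF hCC (by omega)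
      (by rw [Int.toNat_natCast]; exact pvNrm_lt ha1 ha2) hmes
  rw [hplen] at hWF1
  have hfind2 : pvFindA (pvFindA p ((pvNrm L a : Nat) : Int) p.length).1 b p.length
      = pvFindA (pvFindA p ((pvNrm L a : Nat) : Int) p.length).1 ((pvNrm L b : Nat) : Int)
          p.length := by
    by_cases hneg : b < 0
    · rw [hplen]; exact find_norm L _ r b hWF1 hb1 hneg
    · rw [show ((pvNrm L b : Nat) : Int) = b from by unfold pvNrm; rw [if_neg hneg]; omega]
  simp only [pvUnionA]
  rw [hfind1, hfind2]

lemma fold_eq (L : Nat) :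
    ∀ (edges : List (Int × Int × Int)) (p r comp : List Int) (tot : Int),
    (∀ e ∈ edges, -(L : Int) ≤ e.2.1 ∧ e.2.1 < (L : Int) ∧ -(L : Int) ≤ e.2.2 ∧ e.2.2 < (L : Int)) →
    InvQ L comp p r →
    (edges.foldl
      (fun (s : List Int × List Int × Int) e =>
        let u := pvUnionA s.1 s.2.1 e.2.1 e.2.2 s.1.length
        if u.2.2 then (u.1, u.2.1, s.2.2 + e.1) else (u.1, u.2.1, s.2.2)) (p, r, tot)).2.2
    = (edges.foldl
      (fun (s : List Int × Int) e =>
        let ca := PySem.List.pyGetD s.1 e.2.1 0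
        let cb := PySem.List.pyGetD s.1 e.2.2 0
        if ca ≠ cb then (s.1.map (fun c => if c = ca then cb else c), s.2 + e.1) else s)
      (comp, tot)).2 := by
  intro edges
  induction edges with
  | nil => intro p r comp tot _ _; rfl
  | cons e es IH =>
    intro p r comp tot hbound hInv
    obtain ⟨hb1, hb2, hb3, hb4⟩ := hbound e (List.mem_cons_self ..)
    have hbes : ∀ e' ∈ es, -(L : Int) ≤ e'.2.1 ∧ e'.2.1 < (L : Int) ∧ -(L : Int) ≤ e'.2.2 ∧
        e'.2.2 < (L : Int) :=
      fun e' he' => hbound e' (List.mem_cons_of_mem _ he')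
    have hu := union_spec L comp p r ((pvNrm L e.2.1 : Nat) : Int) ((pvNrm L e.2.2 : Nat) : Int)
      hInv (by omega) (by rw [Int.toNat_natCast]; exact pvNrm_lt hb1 hb2) (by omega)
      (by rw [Int.toNat_natCast]; exact pvNrm_lt hb3 hb4)
    simp only [Int.toNat_natCast] at hu
    have hga : PySem.List.pyGetD comp e.2.1 0 = comp.getD (pvNrm L e.2.1) 0 :=
      pyGetD_nrm L comp e.2.1 0 hInv.1 hb1 hb2
    have hgb : PySem.List.pyGetD comp e.2.2 0 = comp.getD (pvNrm L e.2.2) 0 :=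
      pyGetD_nrm L comp e.2.2 0 hInv.1 hb3 hb4
    simp only [List.foldl_cons]
    rw [hga, hgb, union_norm L comp p r e.2.1 e.2.2 hInv hb1 hb2 hb3 hb4]
    cases hflag : (pvUnionA p r ((pvNrm L e.2.1 : Nat) : Int) ((pvNrm L e.2.2 : Nat) : Int)
        p.length).2.2 with
    | true =>
      obtain ⟨hne, hInv'⟩ := hu.2 hflag
      rw [if_pos rfl, if_pos hne]
      exact IH _ _ _ _ hbes hInv'
    | false =>
      obtain ⟨hceq, hInv'⟩ := hu.1 hflag
      rw [if_neg (by simp), if_neg (not_not_intro hceq)]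
      exact IH _ _ _ _ hbes hInv'

-- ===== VERDICT (by name: the statement is the Claim_ definition above) =====
theorem minCostToSupplyWater_spec : Claim_equal_minCostToSupplyWater := by
  intro n wells pipes hDom hPre
  rcases hPre with ⟨hn0, hwl, hpipes⟩ | ⟨hw, hp⟩
  case inr => subst hw; subst hp; rfl
  unfold Spec_minCostToSupplyWater
  simp only [minCostToSupplyWater, minCostToSupplyWater_alt]
  rw [PySem.List.foldl_append_singleton_eq_map, PySem.List.foldl_append_singleton_eq_map,
    List.nil_append]
  set L := (n + 1).toNat with hL
  have hLp : (PySem.List.pyRange 0 (n + 1) 1).length = L := by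
    rw [PySem.List.length_pyRange_one]; simp [hL]
  have hpr : ∀ i : Nat, i < L → (PySem.List.pyRange 0 (n + 1) 1).getD i 0 = (i : Int) := by
    intro i hi
    rw [List.getD_eq_getElem _ _ (by rw [hLp]; exact hi), PySem.List.getElem_pyRange_one]
    simp
  have hrrl : (PySem.List.pyRepeat [(0 : Int)] (n + 1)).length = L := by
    rw [PySem.List.pyRepeat_singleton, List.length_replicate]
  have hInv0 : InvQ L (PySem.List.pyRange 0 (n + 1) 1) (PySem.List.pyRange 0 (n + 1) 1)
      (PySem.List.pyRepeat [(0 : Int)] (n + 1)) := by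
    refine ⟨hLp, ⟨hLp, hrrl, ?_, ?_⟩, ?_, ?_⟩
    · intro i hi; rw [hpr i hi]; exact ⟨by omega, by omega⟩
    · intro i hi hne; exact absurd (hpr i hi) hne
    · intro i hi; rw [hpr i hi, Int.toNat_natCast]; exact (hpr i hi).symm
    · intro i j hi hj _ _ hc; rw [hpr i hi, hpr j hj] at hc; exact_mod_cast hc
  have hLcast : (L : Int) = n + 1 := by omega
  have hbounds : ∀ e ∈ PySem.List.sorted
      ((PySem.List.enumerate wells 0).map (fun iw => (iw.2, (0 : Int), iw.1 + 1))
        ++ pipes.map (fun row => ((pvRow row).2.2, (pvRow row).1, (pvRow row).2.1)))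
      (fun e => e.1) false,
      -(L : Int) ≤ e.2.1 ∧ e.2.1 < (L : Int) ∧ -(L : Int) ≤ e.2.2 ∧ e.2.2 < (L : Int) := by
    intro e he
    rw [PySem.List.mem_sorted] at he
    rcases List.mem_append.mp he with hw | hp
    · obtain ⟨iw, hiw, rfl⟩ := List.mem_map.mp hw
      rw [PySem.List.mem_enumerate_iff] at hiw
      obtain ⟨k, hk, rfl⟩ := hiw
      have hkw : (k : Int) < wells.length := by exact_mod_cast hk
      refine ⟨by show -(L : Int) ≤ 0; omega, by show (0 : Int) < (L : Int); omega, ?_, ?_⟩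
      · show -(L : Int) ≤ 0 + (k : Int) + 1; omega
      · show (0 : Int) + (k : Int) + 1 < (L : Int); omega
    · obtain ⟨row, hrow, rfl⟩ := List.mem_map.mp hp
      obtain ⟨hl3, h10, h1n, h20, h2n⟩ := hpipes row hrow
      rcases row with _ | ⟨a, t⟩
      · simp at hl3
      rcases t with _ | ⟨b, t2⟩
      · simp at hl3
      rcases t2 with _ | ⟨c, t3⟩
      · simp at hl3
      rcases t3 with _ | ⟨d, t4⟩
      swap
      · simp at hl3
      simp only [List.getD_cons_zero, List.getD_cons_succ] at h10 h1n h20 h2n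
      simp only [pvRow]
      exact ⟨by omega, by omega, by omega, by omega⟩
  exact fold_eq L _ _ _ _ 0 hbounds hInv0
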